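-- pv_equiv track=rewrite | github.com/FelixFelicis555/6-Sem | dm/test3/lab2_fptree.py | get_itemsets
-- ===== SOURCE A (Python) =====
-- def get_itemsets(dataset):
--     list_of_items = []
--     for i in dataset:
--         for j in i:
--             if j not in list_of_items:
--                 list_of_items.append(j)
--     list_of_items.sort()
--     return list_of_items
-- ===== SOURCE B (Python) =====
-- def get_itemsets(dataset):
--     all_items = []
--     for row in dataset:
--         all_items.extend(row)
--     all_items.sort()
--     result = []
--     for x in all_items:
--         if not result or result[-1] != x:
--             result.append(x)
--     return result
-- ===== Notes on version B (the rewrite author's own statement) =====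
-- stated objective: faster
-- what changed: Replaces A's per-element membership rescan dedup (quadratic) by flatten + one sort + a single adjacent-duplicate-removal pass.
import Mathlib
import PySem

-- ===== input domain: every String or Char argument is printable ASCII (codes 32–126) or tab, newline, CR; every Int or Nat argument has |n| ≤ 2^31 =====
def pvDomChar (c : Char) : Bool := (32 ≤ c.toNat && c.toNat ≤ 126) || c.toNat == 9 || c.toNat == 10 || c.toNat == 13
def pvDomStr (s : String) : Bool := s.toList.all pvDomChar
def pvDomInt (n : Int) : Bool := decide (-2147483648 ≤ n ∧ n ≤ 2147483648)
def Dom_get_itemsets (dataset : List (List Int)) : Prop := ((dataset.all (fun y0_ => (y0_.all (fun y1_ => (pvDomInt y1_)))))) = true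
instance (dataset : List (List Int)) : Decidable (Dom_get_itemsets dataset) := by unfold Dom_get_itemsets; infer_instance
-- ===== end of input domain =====

-- B replaces A's per-element membership-rescan dedup by flatten + one sort + one
-- adjacent-duplicate-removal pass (objective: faster; same return value).

-- ===== PORT A =====
-- for i in dataset: for j in i: if j not in list_of_items: list_of_items.append(j); then .sort()
def get_itemsets (dataset : List (List Int)) : List Int :=
  let list_of_items : List Int :=
    dataset.foldl (fun acc i =>
      i.foldl (fun acc2 j => if acc2.contains j then acc2 else acc2 ++ [j]) acc) []
  PySem.List.sorted list_of_items (fun x => x) false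

-- ===== PORT B =====
-- all_items = flatten; all_items.sort(); then one pass appending x when result is
-- empty or result[-1] != x  (result[-1] ported exactly as PySem.List.pyGet? result (-1))
def get_itemsets_alt (dataset : List (List Int)) : List Int :=
  let all_items : List Int := dataset.foldl (fun acc row => acc ++ row) []
  let all_items := PySem.List.sorted all_items (fun x => x) false
  all_items.foldl
    (fun result x =>
      if result.isEmpty || (PySem.List.pyGet? result (-1) != some x) then result ++ [x]
      else result) []

-- ===== PRECONDITION & SPEC =====
def Spec_get_itemsets (dataset : List (List Int)) (out : List Int) : Prop := out = get_itemsets_alt dataset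
instance (dataset : List (List Int)) (out : List Int) : Decidable (Spec_get_itemsets dataset out) := by unfold Spec_get_itemsets; infer_instance

-- ===== CLAIM (what is proved, stated in full; the proofs are below) =====
def Claim_equal_get_itemsets : Prop := ∀ (dataset : List (List Int)), Dom_get_itemsets dataset → Spec_get_itemsets dataset (get_itemsets dataset)

-- ===== LEMMAS AND PROOFS =====

-- A's dedup accumulator is exactly set-of-list of the flattened dataset
theorem getA_eq_sorted_ofList (dataset : List (List Int)) :
    get_itemsets dataset
      = PySem.List.sorted (PySem.Set.ofList dataset.flatten) (fun x => x) false := by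
  unfold get_itemsets
  rw [PySem.Set.ofList_eq_foldl, ← List.foldl_flatten]
  rfl

-- recursive form of B's adjacent-dedup pass
def dedAdj (m : Int) : List Int → List Int
  | [] => [m]
  | x :: xs => if m = x then dedAdj m xs else m :: dedAdj x xs

theorem pyGet_last (acc : List Int) (m : Int) :
    PySem.List.pyGet? (acc ++ [m]) (-1) = some m := by
  simp [PySem.List.pyGet?, PySem.List.pyIdx?]

theorem foldl_step_eq_dedAdj (s : List Int) : ∀ (acc : List Int) (m : Int),
    s.foldl (fun result x =>
      if result.isEmpty || (PySem.List.pyGet? result (-1) != some x) then result ++ [x]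
      else result) (acc ++ [m]) = acc ++ dedAdj m s := by
  induction s with
  | nil => intro acc m; simp [dedAdj]
  | cons x xs ih =>
    intro acc m
    have hcond : ((acc ++ [m]).isEmpty || (PySem.List.pyGet? (acc ++ [m]) (-1) != some x))
        = !(m == x) := by rw [pyGet_last]; cases acc <;> simp [bne]
    rw [List.foldl_cons, hcond]
    by_cases h : m = x
    · subst h
      simp only [beq_self_eq_true, Bool.not_true, Bool.false_eq_true, if_false]
      rw [ih acc m]
      simp [dedAdj]
    · have hb : (!(m == x)) = true := by simp [h]
      rw [hb, if_pos rfl, List.append_assoc, ← List.append_assoc acc, ih (acc ++ [m]) x,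
        List.append_assoc]
      simp [dedAdj, h]

theorem mem_dedAdj (s : List Int) : ∀ (m a : Int), a ∈ dedAdj m s ↔ a = m ∨ a ∈ s := by
  induction s with
  | nil => intro m a; simp [dedAdj]
  | cons x xs ih =>
    intro m a
    by_cases h : m = x <;> simp [dedAdj, h, ih, List.mem_cons]

theorem pairwise_dedAdj (s : List Int) : ∀ (m : Int),
    (m :: s).Pairwise (· ≤ ·) → (dedAdj m s).Pairwise (· < ·) := by
  induction s with
  | nil => intro m _; simp [dedAdj]
  | cons x xs ih =>
    intro m hp
    rw [List.pairwise_cons] at hp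
    obtain ⟨hm, hx⟩ := hp
    by_cases h : m = x
    · subst h
      simp only [dedAdj]
      exact ih m (by rw [List.pairwise_cons]; exact ⟨fun b hb => hm b (List.mem_cons_of_mem _ hb), (List.pairwise_cons.mp hx).2⟩)
    · simp only [dedAdj, if_neg h]
      rw [List.pairwise_cons]
      refine ⟨?_, ih x hx⟩
      intro b hb
      have hbmem : b = x ∨ b ∈ xs := (mem_dedAdj xs x b).mp hb
      have hmx : m < x := lt_of_le_of_ne (hm x (List.mem_cons_self)) h
      rcases hbmem with rfl | hb'
      · exact hmx
      · exact lt_of_lt_of_le hmx ((List.pairwise_cons.mp hx).1 b hb')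

-- ===== VERDICT (by name: the statement is the Claim_ definition above) =====
theorem get_itemsets_spec : Claim_equal_get_itemsets := by
  intro dataset _
  unfold Spec_get_itemsets
  rw [getA_eq_sorted_ofList]
  unfold get_itemsets_alt
  rw [PySem.List.foldl_append_eq_flatten]
  simp only [List.nil_append]
  set F := dataset.flatten with hF
  set S := PySem.List.sorted F (fun x => x) false with hS
  have hSp : S.Pairwise (· ≤ ·) := by
    have := PySem.List.sorted_pairwise (xs := F) (key := fun x => x)
    simpa [← hS] using this
  have hSmem : ∀ a, a ∈ S ↔ a ∈ F := fun a => hS ▸ PySem.List.mem_sorted F (fun x => x) false a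
  -- compute B's pass
  cases hSe : S with
  | nil =>
    -- F has no elements, so ofList F = [] and sorted [] = []
    have hFnil : F = [] := by
      cases hFe : F with
      | nil => rfl
      | cons y ys =>
        exfalso
        have : y ∈ S := (hSmem y).mpr (by simp [hFe])
        simp [hSe] at this
    simp [hFnil, PySem.Set.ofList, PySem.List.sorted]
  | cons x xs =>
    have hfold : (x :: xs).foldl (fun result x =>
        if result.isEmpty || (PySem.List.pyGet? result (-1) != some x) then result ++ [x]
        else result) [] = dedAdj x xs := by
      simp only [List.foldl_cons, List.isEmpty_nil, Bool.true_or]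
      have := foldl_step_eq_dedAdj xs [] x
      simpa using this
    rw [hfold]
    have hSp' : (x :: xs).Pairwise (· ≤ ·) := hSe ▸ hSp
    have hlt : (dedAdj x xs).Pairwise (· < ·) := pairwise_dedAdj xs x hSp'
    have hnd : (dedAdj x xs).Nodup := hlt.imp ne_of_lt
    have hmem : ∀ a, a ∈ dedAdj x xs ↔ a ∈ PySem.Set.ofList F := by
      intro a
      rw [mem_dedAdj, PySem.Set.mem_ofList]
      have : a ∈ S ↔ a ∈ F := hSmem a
      rw [hSe] at this
      simp only [List.mem_cons] at this
      exact this
    have hperm : (dedAdj x xs).Perm (PySem.Set.ofList F) :=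
      (List.perm_ext_iff_of_nodup hnd (PySem.Set.nodup_ofList F)).mpr hmem
    exact PySem.List.sorted_eq_of_perm_of_pairwise_lt _ _ (fun x => x) hperm hlt
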